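-- pv_equiv track=rewrite | github.com/nunoscholly/CSunicorn | ml/forecast.py | aggregate_daily
-- ===== SOURCE A (Python) =====
-- WORKDAY_HOURS = 12
--
-- TOTAL_DAYS = 9
--
-- def aggregate_daily(sorted_tasks, earliest_start, earliest_end, people_per_task):
--     """Personalbedarf pro Tag aggregieren (12h-Arbeitstag)."""
--     daily_people = {}
--     daily_tasks = {}
--
--     for day in range(1, TOTAL_DAYS + 1):
--         # Tagesgrenzen in Stunden seit Start
--         day_start_h = (day - 1) * WORKDAY_HOURS
--         # Letzter Tag faengt alles auf was ueber den 9-Tage-Horizont hinausgeht,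
--         # damit keine Aufgaben und Personen "verschwinden"
--         if day == TOTAL_DAYS:
--             day_end_h = 9999
--         else:
--             day_end_h = day * WORKDAY_HOURS
--
--         people_total = 0
--         active_tasks = []
--
--         for task in sorted_tasks:
--             task_start = earliest_start[task]
--
--             # Eine Aufgabe zaehlt fuer den Tag, an dem sie STARTET.
--             # Wenn eine Aufgabe laenger als 12h dauert (z.B. "Fahrdienst" 16h
--             # am Showday), wuerde sie sonst auch am naechsten Tag gezaehlt
--             # und den Personalbedarf dort faelschlich aufblaehen — die Leute
--             # arbeiten eine lange Schicht, nicht zwei separate Tage.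
--             # Meilensteine (Dauer 0) werden am Starttag gezaehlt (>= Pruefung).
--             if task_start >= day_start_h and task_start < day_end_h:
--                 people_total = people_total + people_per_task.get(task, 0)
--                 active_tasks.append(task)
--
--         daily_people[day] = people_total
--         daily_tasks[day] = active_tasks
--
--     return daily_people, daily_tasks
-- ===== SOURCE B (Python) =====
-- WORKDAY_HOURS = 12
--
-- TOTAL_DAYS = 9
--
-- def _find_day(task_start, windows):
--     """Day whose [start, end) window contains task_start, else None."""
--     for day, (lo, hi) in enumerate(windows, 1):
--         if lo <= task_start < hi:
--             return day
--     return None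
--
-- def aggregate_daily(sorted_tasks, earliest_start, earliest_end, people_per_task):
--     """Personalbedarf pro Tag aggregieren (12h-Arbeitstag)."""
--     # Day windows in hours since start; the last day's window is open-ended
--     # (bounded by 9999) so late tasks still land on the final day.
--     windows = [((day - 1) * WORKDAY_HOURS,
--                 9999 if day == TOTAL_DAYS else day * WORKDAY_HOURS)
--                for day in range(1, TOTAL_DAYS + 1)]
--     daily_people = {day: 0 for day in range(1, TOTAL_DAYS + 1)}
--     daily_tasks = {day: [] for day in range(1, TOTAL_DAYS + 1)}
--     for task in sorted_tasks:
--         day = _find_day(earliest_start[task], windows)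
--         if day is not None:
--             daily_people[day] += people_per_task.get(task, 0)
--             daily_tasks[day].append(task)
--     return daily_people, daily_tasks
-- ===== Notes on version B (the rewrite author's own statement) =====
-- stated objective: alternative
-- what changed: Replaces A's nine full rescans of sorted_tasks (one interval test per day) by a single pass over the tasks that looks up each task's day window in a precomputed windows list and accumulates into pre-initialized per-day dicts; Pre_ excludes only inputs where A raises KeyError (a task missing from earliest_start).
import Mathlib
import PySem

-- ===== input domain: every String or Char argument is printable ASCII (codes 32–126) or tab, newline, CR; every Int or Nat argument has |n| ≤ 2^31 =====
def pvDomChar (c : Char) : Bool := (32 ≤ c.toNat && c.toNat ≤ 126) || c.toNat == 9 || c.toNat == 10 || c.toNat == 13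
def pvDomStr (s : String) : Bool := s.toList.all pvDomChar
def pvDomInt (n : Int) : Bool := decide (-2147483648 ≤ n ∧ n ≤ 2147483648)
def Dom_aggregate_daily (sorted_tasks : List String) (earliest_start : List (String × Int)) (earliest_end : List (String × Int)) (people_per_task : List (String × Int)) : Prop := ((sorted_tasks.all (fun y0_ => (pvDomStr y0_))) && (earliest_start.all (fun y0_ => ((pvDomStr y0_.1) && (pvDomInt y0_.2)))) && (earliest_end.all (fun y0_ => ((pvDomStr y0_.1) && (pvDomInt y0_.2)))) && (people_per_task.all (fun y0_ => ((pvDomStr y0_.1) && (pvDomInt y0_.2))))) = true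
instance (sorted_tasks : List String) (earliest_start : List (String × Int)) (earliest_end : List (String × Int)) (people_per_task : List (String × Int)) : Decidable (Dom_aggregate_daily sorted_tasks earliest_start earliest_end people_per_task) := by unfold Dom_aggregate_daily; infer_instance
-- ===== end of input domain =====

-- B replaces A's nine rescans of the task list (one per day) by a single pass over the
-- tasks that looks up each task's day window in a precomputed windows list
-- (objective: alternative).

-- ===== PORT A =====
-- Literal port of A: outer loop over days 1..9, inner rescan of sorted_tasks.
-- earliest_start[task] (KeyError when the key is missing, excluded by Pre_) is ported as getD _ 0.
def aggregate_daily (sorted_tasks : List String) (earliest_start : List (String × Int)) (earliest_end : List (String × Int)) (people_per_task : List (String × Int)) : (List (Int × Int)) × (List (Int × List String)) :=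
  let esd : PySem.Dict String Int := PySem.Dict.mk earliest_start
  let ppd : PySem.Dict String Int := PySem.Dict.mk people_per_task
  let res := (PySem.List.pyRange 1 10 1).foldl
    (fun (acc : PySem.Dict Int Int × PySem.Dict Int (List String)) day =>
      let day_start_h : Int := (day - 1) * 12
      let day_end_h : Int := if day == 9 then 9999 else day * 12
      let inner := sorted_tasks.foldl
        (fun (st : Int × List String) task =>
          let task_start := esd.getD task 0
          if day_start_h ≤ task_start ∧ task_start < day_end_h then
            (st.1 + ppd.getD task 0, st.2 ++ [task])
          else st)
        (0, [])
      (acc.1.insert day inner.1, acc.2.insert day inner.2))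
    (PySem.Dict.empty, PySem.Dict.empty)
  (res.1.items, res.2.items)

-- ===== PORT B =====
-- Port of _find_day: scan the windows with a day counter, return the first match.
def pvFindDay (task_start : Int) : List (Int × Int) → Int → Option Int
  | [], _ => none
  | (lo, hi) :: rest, day =>
      if lo ≤ task_start ∧ task_start < hi then some day
      else pvFindDay task_start rest (day + 1)

-- Literal port of Source B: windows list, pre-initialized day dicts, one pass over tasks.
def aggregate_daily_alt (sorted_tasks : List String) (earliest_start : List (String × Int)) (earliest_end : List (String × Int)) (people_per_task : List (String × Int)) : (List (Int × Int)) × (List (Int × List String)) :=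
  let esd : PySem.Dict String Int := PySem.Dict.mk earliest_start
  let ppd : PySem.Dict String Int := PySem.Dict.mk people_per_task
  let windows : List (Int × Int) := (PySem.List.pyRange 1 10 1).map
    (fun day => ((day - 1) * 12, if day == 9 then 9999 else day * 12))
  let dp0 : PySem.Dict Int Int := (PySem.List.pyRange 1 10 1).foldl (fun d day => d.insert day 0) PySem.Dict.empty
  let dt0 : PySem.Dict Int (List String) := (PySem.List.pyRange 1 10 1).foldl (fun d day => d.insert day []) PySem.Dict.empty
  let res := sorted_tasks.foldl
    (fun (acc : PySem.Dict Int Int × PySem.Dict Int (List String)) task =>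
      match pvFindDay (esd.getD task 0) windows 1 with
      | none => acc
      | some day =>
          (acc.1.insert day (acc.1.getD day 0 + ppd.getD task 0),
           acc.2.modify day [] (fun l => l ++ [task])))
    (dp0, dt0)
  (res.1.items, res.2.items)

-- ===== PRECONDITION & SPEC =====
-- Pre_ excludes only inputs on which Python A raises KeyError: a task of sorted_tasks missing from earliest_start.
def Pre_aggregate_daily (sorted_tasks : List String) (earliest_start : List (String × Int)) (earliest_end : List (String × Int)) (people_per_task : List (String × Int)) : Prop :=
  ∀ t ∈ sorted_tasks, (PySem.Dict.mk earliest_start).contains t = true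
instance (sorted_tasks : List String) (earliest_start : List (String × Int)) (earliest_end : List (String × Int)) (people_per_task : List (String × Int)) : Decidable (Pre_aggregate_daily sorted_tasks earliest_start earliest_end people_per_task) := by unfold Pre_aggregate_daily; infer_instance
def pvWitness_aggregate_daily : List String × (List (String × Int)) × (List (String × Int)) × (List (String × Int)) :=
  (["a", "b"], [("a", 5), ("b", 100)], [], [("a", 2)])
def Spec_aggregate_daily (sorted_tasks : List String) (earliest_start : List (String × Int)) (earliest_end : List (String × Int)) (people_per_task : List (String × Int)) (out : (List (Int × Int)) × (List (Int × List String))) : Prop := out = aggregate_daily_alt sorted_tasks earliest_start earliest_end people_per_task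
instance (sorted_tasks : List String) (earliest_start : List (String × Int)) (earliest_end : List (String × Int)) (people_per_task : List (String × Int)) (out : (List (Int × Int)) × (List (Int × List String))) : Decidable (Spec_aggregate_daily sorted_tasks earliest_start earliest_end people_per_task out) := by unfold Spec_aggregate_daily; infer_instance

-- ===== CLAIM (what is proved, stated in full; the proofs are below) =====
def Claim_equal_aggregate_daily : Prop := ∀ (sorted_tasks : List String) (earliest_start : List (String × Int)) (earliest_end : List (String × Int)) (people_per_task : List (String × Int)), Dom_aggregate_daily sorted_tasks earliest_start earliest_end people_per_task → Pre_aggregate_daily sorted_tasks earliest_start earliest_end people_per_task → Spec_aggregate_daily sorted_tasks earliest_start earliest_end people_per_task (aggregate_daily sorted_tasks earliest_start earliest_end people_per_task)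

-- ===== LEMMAS AND PROOFS =====

def pvW9 : List (Int × Int) := [(0,12),(12,24),(24,36),(36,48),(48,60),(60,72),(72,84),(84,96),(96,9999)]

def pvCond (esd : PySem.Dict String Int) (d : Int) (task : String) : Bool :=
  decide ((d - 1) * 12 ≤ esd.getD task 0 ∧ esd.getD task 0 < (if d == 9 then 9999 else d * 12))
def pvSum (esd ppd : PySem.Dict String Int) (d : Int) (l : List String) : Int :=
  ((l.filter (pvCond esd d)).map (fun t => ppd.getD t 0)).sum
def pvTasks (esd : PySem.Dict String Int) (d : Int) (l : List String) : List String :=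
  l.filter (pvCond esd d)

lemma findDay_none (ts : Int) (h : pvFindDay ts pvW9 1 = none) :
    ts < 0 ∨ 9999 ≤ ts := by
  simp only [pvW9, pvFindDay] at h
  split_ifs at h <;> omega

lemma findDay_some (ts d : Int) (h : pvFindDay ts pvW9 1 = some d) :
    1 ≤ d ∧ d ≤ 9 ∧ (d - 1) * 12 ≤ ts ∧ ts < (if d = 9 then 9999 else d * 12) := by
  simp only [pvW9, pvFindDay] at h
  split_ifs at h <;> (injection h with h; subst h; norm_num <;> omega)

lemma innerA (esd ppd : PySem.Dict String Int) (d : Int)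
    (l : List String) (s : Int) (ts0 : List String) :
    l.foldl (fun (st : Int × List String) task =>
        let task_start := esd.getD task 0
        if (d - 1) * 12 ≤ task_start ∧ task_start < (if d == 9 then 9999 else d * 12) then
          (st.1 + ppd.getD task 0, st.2 ++ [task])
        else st) (s, ts0)
      = (s + pvSum esd ppd d l, ts0 ++ pvTasks esd d l) := by
  induction l generalizing s ts0 with
  | nil => simp [pvSum, pvTasks]
  | cons a l ih =>
    simp only [List.foldl_cons]
    by_cases h : (d - 1) * 12 ≤ esd.getD a 0 ∧ esd.getD a 0 < (if d == 9 then 9999 else d * 12)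
    · have hcT : pvCond esd d a = true := decide_eq_true h
      simp only [if_pos h, ih, pvSum, pvTasks, List.filter_cons, hcT, if_true, List.map_cons,
        List.sum_cons]
      simp only [Prod.mk.injEq]
      exact ⟨by ring, by simp⟩
    · have hcF : pvCond esd d a = false := decide_eq_false h
      simp only [if_neg h, ih, pvSum, pvTasks, List.filter_cons, hcF]
      simp

def nineP (p : Int → Int) : PySem.Dict Int Int :=
  PySem.Dict.mk [(1, p 1), (2, p 2), (3, p 3), (4, p 4), (5, p 5), (6, p 6), (7, p 7), (8, p 8), (9, p 9)]
def nineT (t : Int → List String) : PySem.Dict Int (List String) :=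
  PySem.Dict.mk [(1, t 1), (2, t 2), (3, t 3), (4, t 4), (5, t 5), (6, t 6), (7, t 7), (8, t 8), (9, t 9)]
lemma nineP_congr (p q : Int → Int) (h : ∀ d, 1 ≤ d → d ≤ 9 → p d = q d) : nineP p = nineP q := by
  simp [nineP, h 1 (by norm_num) (by norm_num), h 2 (by norm_num) (by norm_num),
    h 3 (by norm_num) (by norm_num), h 4 (by norm_num) (by norm_num),
    h 5 (by norm_num) (by norm_num), h 6 (by norm_num) (by norm_num),
    h 7 (by norm_num) (by norm_num), h 8 (by norm_num) (by norm_num),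
    h 9 (by norm_num) (by norm_num)]
lemma nineT_congr (t u : Int → List String) (h : ∀ d, 1 ≤ d → d ≤ 9 → t d = u d) : nineT t = nineT u := by
  simp [nineT, h 1 (by norm_num) (by norm_num), h 2 (by norm_num) (by norm_num),
    h 3 (by norm_num) (by norm_num), h 4 (by norm_num) (by norm_num),
    h 5 (by norm_num) (by norm_num), h 6 (by norm_num) (by norm_num),
    h 7 (by norm_num) (by norm_num), h 8 (by norm_num) (by norm_num),
    h 9 (by norm_num) (by norm_num)]
lemma getD_nineP (p : Int → Int) (d : Int) (h1 : 1 ≤ d) (h9 : d ≤ 9) :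
    (nineP p).getD d 0 = p d := by
  interval_cases d <;> simp [nineP, PySem.Dict.getD, PySem.Dict.get?]
lemma insert_nineP (p : Int → Int) (d v : Int) (h1 : 1 ≤ d) (h9 : d ≤ 9) :
    (nineP p).insert d v = nineP (fun e => if e = d then v else p e) := by
  interval_cases d <;> simp [nineP, PySem.Dict.insert, PySem.Dict.contains]
lemma modify_nineT (t : Int → List String) (d : Int) (f : List String → List String)
    (h1 : 1 ≤ d) (h9 : d ≤ 9) :
    (nineT t).modify d [] f = nineT (fun e => if e = d then f (t e) else t e) := by
  interval_cases d <;>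
    simp [nineT, PySem.Dict.modify, PySem.Dict.insert, PySem.Dict.contains, PySem.Dict.getD, PySem.Dict.get?]

lemma B_inv (esd ppd : PySem.Dict String Int) (l : List String) (p : Int → Int) (t : Int → List String) :
    l.foldl (fun (acc : PySem.Dict Int Int × PySem.Dict Int (List String)) task =>
        match pvFindDay (esd.getD task 0) pvW9 1 with
        | none => acc
        | some day =>
            (acc.1.insert day (acc.1.getD day 0 + ppd.getD task 0),
             acc.2.modify day [] (fun l => l ++ [task])))
      (nineP p, nineT t)
      = (nineP (fun d => p d + pvSum esd ppd d l), nineT (fun d => t d ++ pvTasks esd d l)) := by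
  induction l generalizing p t with
  | nil =>
    simp only [List.foldl_nil, pvSum, pvTasks, List.filter_nil, List.map_nil, List.sum_nil,
      List.append_nil, add_zero]
  | cons a l ih =>
    simp only [List.foldl_cons]
    cases hF : pvFindDay (esd.getD a 0) pvW9 1 with
    | none =>
      have hout := findDay_none _ hF
      have hcF : ∀ d, 1 ≤ d → d ≤ 9 → pvCond esd d a = false := by
        intro d h1 h9
        apply decide_eq_false
        by_cases h9' : d = 9 <;> simp [h9'] <;> omega
      simp only [hF, ih]
      simp only [Prod.mk.injEq]
      constructor
      · apply nineP_congr; intro d h1 h9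
        simp [pvSum, List.filter_cons, hcF d h1 h9]
      · apply nineT_congr; intro d h1 h9
        simp [pvTasks, List.filter_cons, hcF d h1 h9]
    | some day =>
      obtain ⟨hb1, hb9, hlo, hhi⟩ := findDay_some _ _ hF
      have hcond : ∀ d, 1 ≤ d → d ≤ 9 → pvCond esd d a = decide (d = day) := by
        intro d h1 h9
        rw [pvCond, Bool.eq_iff_iff]
        simp only [decide_eq_true_eq]
        constructor
        · rintro ⟨hl, hh⟩
          by_cases hd9 : d = 9 <;> by_cases hy9 : day = 9 <;>
            simp_all <;> omega
        · rintro rfl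
          simp only [beq_iff_eq]
          exact ⟨hlo, by split_ifs with h <;> simp_all⟩
      simp only [hF]
      rw [getD_nineP p day hb1 hb9, insert_nineP p day _ hb1 hb9,
        modify_nineT t day _ hb1 hb9, ih]
      simp only [Prod.mk.injEq]
      constructor
      · apply nineP_congr; intro d h1 h9
        simp only [pvSum, pvTasks, List.filter_cons, hcond d h1 h9]
        by_cases hd : d = day
        · simp only [hd, decide_true, if_pos, List.map_cons, List.sum_cons, if_true]
          ring
        · simp [hd]
      · apply nineT_congr; intro d h1 h9
        simp only [pvTasks, List.filter_cons, hcond d h1 h9]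
        by_cases hd : d = day
        · simp [hd]
        · simp [hd]

-- ===== VERDICT (by name: the statement is the Claim_ definition above) =====
theorem aggregate_daily_spec : Claim_equal_aggregate_daily := by
  intro sorted_tasks earliest_start earliest_end people_per_task _ _
  unfold Spec_aggregate_daily
  unfold aggregate_daily aggregate_daily_alt
  have hr : PySem.List.pyRange 1 10 1 = [1, 2, 3, 4, 5, 6, 7, 8, 9] := by decide
  rw [hr]
  set esd : PySem.Dict String Int := PySem.Dict.mk earliest_start with hesd
  set ppd : PySem.Dict String Int := PySem.Dict.mk people_per_task with hppd
  have hw : ([1, 2, 3, 4, 5, 6, 7, 8, 9] : List Int).map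
      (fun day => ((day - 1) * 12, if day == 9 then 9999 else day * 12)) = pvW9 := by decide
  have hdp : ([1, 2, 3, 4, 5, 6, 7, 8, 9] : List Int).foldl (fun d day => d.insert day 0) PySem.Dict.empty = nineP (fun _ => 0) := by decide
  have hdt : ([1, 2, 3, 4, 5, 6, 7, 8, 9] : List Int).foldl (fun d day => d.insert day ([] : List String)) PySem.Dict.empty = nineT (fun _ => []) := by decide
  simp only []
  rw [hw, hdp, hdt, B_inv esd ppd sorted_tasks (fun _ => 0) (fun _ => [])]
  simp only [List.foldl_cons, List.foldl_nil]
  rw [innerA esd ppd 1, innerA esd ppd 2, innerA esd ppd 3, innerA esd ppd 4,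
      innerA esd ppd 5, innerA esd ppd 6, innerA esd ppd 7, innerA esd ppd 8,
      innerA esd ppd 9]
  simp only [zero_add, List.nil_append]
  norm_num [PySem.Dict.insert, PySem.Dict.contains, PySem.Dict.empty, nineP, nineT,
    PySem.Dict.items]
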